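-- pv_equiv track=rewrite | github.com/Laplace0826/Auto_Fanout | base_function.py | focus_on_one_component
-- ===== SOURCE A (Python) =====
-- def focus_on_one_component(data_pin_pair,com_name):
--     clear = 0
--     while clear==0:
--         clear=1
--         for i in range(len(data_pin_pair)):
--             check=0
--             for j in range(len(data_pin_pair[i])):
--                 if data_pin_pair[i][j][0]==com_name:
--                     check=1
--             if check==0:
--                 del data_pin_pair[i]
--                 clear=0
--                 break
--     for i in range(len(data_pin_pair)):
--         if data_pin_pair[i][0][0]!=com_name:
--             for j in range(len(data_pin_pair[i])):
--                 if data_pin_pair[i][j][0]==com_name: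
--                     (data_pin_pair[i][0],data_pin_pair[i][j])=(data_pin_pair[i][j],data_pin_pair[i][0])
--     return data_pin_pair
-- ===== SOURCE B (Python) =====
-- # Single pass: keep the sublists that mention com_name, and for each kept
-- # sublist whose head is not com_name swap each matching pin to the front in
-- # turn.  Equivalence is about the
-- # return value; like A, data_pin_pair is updated in place.
-- def _pull_front(pins, com_name):
--     if pins[0][0] == com_name:
--         return pins
--     out = list(pins)
--     for j in (k for k, p in enumerate(pins) if p[0] == com_name):
--         out[0], out[j] = out[j], out[0]
--     return out
--
--
-- def focus_on_one_component(data_pin_pair, com_name):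
--     kept = [_pull_front(pins, com_name) for pins in data_pin_pair
--             if any(p[0] == com_name for p in pins)]
--     data_pin_pair[:] = kept
--     return data_pin_pair
-- ===== Notes on version B (the rewrite author's own statement) =====
-- stated objective: simpler
-- what changed: A deletes non-matching sublists one at a time inside a restart-from-scratch while-loop (rescanning the list after every deletion, O(n^2) rescans) and rescans every position when swapping; B keeps the matching sublists in one comprehension pass and swaps only over the precomputed match indices of each kept sublist.
import Mathlib
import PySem

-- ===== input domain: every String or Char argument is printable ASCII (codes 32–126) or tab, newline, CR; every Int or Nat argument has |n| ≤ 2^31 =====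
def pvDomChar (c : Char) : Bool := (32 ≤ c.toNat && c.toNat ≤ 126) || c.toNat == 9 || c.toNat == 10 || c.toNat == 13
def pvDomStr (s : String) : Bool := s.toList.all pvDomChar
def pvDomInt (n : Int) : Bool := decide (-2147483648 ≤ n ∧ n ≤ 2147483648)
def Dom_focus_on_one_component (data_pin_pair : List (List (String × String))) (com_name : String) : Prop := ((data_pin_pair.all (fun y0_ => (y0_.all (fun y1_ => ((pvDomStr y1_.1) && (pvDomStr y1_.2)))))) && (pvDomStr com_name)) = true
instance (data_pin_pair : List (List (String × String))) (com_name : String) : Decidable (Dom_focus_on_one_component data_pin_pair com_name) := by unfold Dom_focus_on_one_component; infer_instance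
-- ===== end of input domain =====

-- B replaces A's restart-after-delete filtering loop by a single-pass comprehension over
-- precomputed match indices (simpler); equivalence is about the RETURN value (both
-- Pythons also update data_pin_pair in place, A element by element, B wholesale).

-- ===== PORT A =====
-- inner 'for j' of phase 1: check = 1 iff some pin of the sublist names com_name
def pvCheckA (pins : List (String × String)) (com_name : String) : Nat :=
  pins.foldl (fun check p => if p.1 == com_name then 1 else check) 0

-- 'while clear==0' loop: repeatedly delete the first sublist with check == 0
def pvPhase1A (data_pin_pair : List (List (String × String))) (com_name : String) :
    List (List (String × String)) :=
  match hfind : data_pin_pair.findIdx? (fun pins => pvCheckA pins com_name == 0) with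
  | some i => pvPhase1A (data_pin_pair.eraseIdx i) com_name
  | none => data_pin_pair
termination_by data_pin_pair.length
decreasing_by
  have hi : i < data_pin_pair.length := (List.findIdx?_eq_some_iff_findIdx_eq.mp hfind).1
  simp [List.length_eraseIdx, hi]
  omega

-- '(l[0], l[j]) = (l[j], l[0])' tuple swap on the current list
def pvSwapA (acc : List (String × String)) (j : Nat) : List (String × String) :=
  let a0 := acc.getD 0 ("", "")
  let aj := acc.getD j ("", "")
  (acc.set 0 aj).set j a0

-- inner 'for j' of phase 2: swap every pin currently naming com_name with the front
def pvInnerA (pins : List (String × String)) (com_name : String) : List (String × String) :=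
  (List.range pins.length).foldl
    (fun acc j => if (acc.getD j ("", "")).1 == com_name then pvSwapA acc j else acc) pins

def focus_on_one_component (data_pin_pair : List (List (String × String))) (com_name : String) :
    List (List (String × String)) :=
  (pvPhase1A data_pin_pair com_name).map
    (fun pins => if (pins.getD 0 ("", "")).1 != com_name then pvInnerA pins com_name else pins)

-- ===== PORT B =====
-- _pull_front: swap each matching pin (indices precomputed on the original pins) to the front
-- (pins.getD 0 is exact here: Source B only calls _pull_front on sublists that contain a match)
def pvPullFrontB (pins : List (String × String)) (com_name : String) : List (String × String) :=
  if (pins.getD 0 ("", "")).1 == com_name then pins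
  else
    ((List.range pins.length).filter (fun k => (pins.getD k ("", "")).1 == com_name)).foldl
      (fun out j => (out.set 0 (out.getD j ("", ""))).set j (out.getD 0 ("", ""))) pins

def focus_on_one_component_alt (data_pin_pair : List (List (String × String))) (com_name : String) :
    List (List (String × String)) :=
  (data_pin_pair.filter (fun pins => pins.any (fun p => p.1 == com_name))).map
    (fun pins => pvPullFrontB pins com_name)

-- ===== PRECONDITION & SPEC =====
def Spec_focus_on_one_component (data_pin_pair : List (List (String × String))) (com_name : String) (out : List (List (String × String))) : Prop := out = focus_on_one_component_alt data_pin_pair com_name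
instance (data_pin_pair : List (List (String × String))) (com_name : String) (out : List (List (String × String))) : Decidable (Spec_focus_on_one_component data_pin_pair com_name out) := by unfold Spec_focus_on_one_component; infer_instance

-- ===== CLAIM (what is proved, stated in full; the proofs are below) =====
def Claim_equal_focus_on_one_component : Prop := ∀ (data_pin_pair : List (List (String × String))) (com_name : String), Dom_focus_on_one_component data_pin_pair com_name → Spec_focus_on_one_component data_pin_pair com_name (focus_on_one_component data_pin_pair com_name)

-- ===== LEMMAS AND PROOFS =====

-- phase-1 check flag computes the 'any' of B's filter
theorem pvCheckA_eq (pins : List (String × String)) (com_name : String) :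
    pvCheckA pins com_name = if pins.any (fun p => p.1 == com_name) then 1 else 0 := by
  have h : ∀ (l : List (String × String)) (init : Nat),
      l.foldl (fun check p => if p.1 == com_name then 1 else check) init
        = if l.any (fun p => p.1 == com_name) then 1 else init := by
    intro l
    induction l with
    | nil => intro init; simp
    | cons hd tl ih =>
      intro init
      rw [List.foldl_cons, List.any_cons]
      by_cases hhd : (hd.1 == com_name) = true
      · rw [if_pos hhd, ih]
        simp [hhd]
      · rw [if_neg hhd, ih, eq_false_of_ne_true hhd, Bool.false_or]
  exact h pins 0

theorem getD_set_ne {α : Type} (l : List α) (v : α) (i j : Nat) (d : α) (h : i ≠ j) :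
    (l.set i v).getD j d = l.getD j d := by
  simp [List.getD_eq_getElem?_getD, List.getElem?_set_ne h]

-- deleting a sublist that fails the filter predicate does not change the filtered list
theorem filter_eraseIdx_eq (dp : List (List (String × String))) (com_name : String) (i : Nat)
    (hi : i < dp.length) (hbad : (dp[i].any (fun p => p.1 == com_name)) = false) :
    (dp.eraseIdx i).filter (fun pins => pins.any (fun p => p.1 == com_name))
      = dp.filter (fun pins => pins.any (fun p => p.1 == com_name)) := by
  rw [List.eraseIdx_eq_take_drop_succ, List.filter_append]
  conv_rhs => rw [← List.take_append_drop i dp, List.drop_eq_getElem_cons hi]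
  rw [List.filter_append, List.filter_cons, hbad]
  simp

-- A's restart-after-delete loop computes B's single-pass filter
theorem pvPhase1A_eq (data_pin_pair : List (List (String × String))) (com_name : String) :
    pvPhase1A data_pin_pair com_name
      = data_pin_pair.filter (fun pins => pins.any (fun p => p.1 == com_name)) := by
  induction hn : data_pin_pair.length using Nat.strong_induction_on generalizing data_pin_pair with
  | _ n ih =>
    rw [pvPhase1A]
    split
    · next i h =>
      obtain ⟨hi, hp, -⟩ := List.findIdx?_eq_some_iff_getElem.mp h
      rw [pvCheckA_eq] at hp
      have hbad : (data_pin_pair[i].any (fun p => p.1 == com_name)) = false := by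
        by_cases hany : (data_pin_pair[i].any (fun p => p.1 == com_name)) = true
        · rw [if_pos hany] at hp; simp at hp
        · exact eq_false_of_ne_true hany
      have hlen : (data_pin_pair.eraseIdx i).length < n := by
        simp [List.length_eraseIdx, hi]; omega
      rw [ih _ hlen _ rfl, filter_eraseIdx_eq _ _ _ hi hbad]
    · next h =>
      symm
      rw [List.filter_eq_self]
      intro pins hmem
      have h2 := List.findIdx?_eq_none_iff.mp h pins hmem
      rw [pvCheckA_eq] at h2
      by_cases hany : (pins.any (fun p => p.1 == com_name)) = true
      · exact hany
      · rw [if_neg hany] at h2; simp at h2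

-- core loop lemma: from index a ≥ 1 on, A's conditional swap loop (condition read off the
-- CURRENT list) equals B's swap loop over the match indices of the ORIGINAL pins, as long
-- as the accumulator still agrees with pins from position a on (swaps only touch 0 and
-- already-passed positions).
theorem swap_loop_eq (pins : List (String × String)) (com_name : String) :
    ∀ (m a : Nat) (acc : List (String × String)), 1 ≤ a →
      (∀ j, a ≤ j → acc.getD j ("", "") = pins.getD j ("", "")) →
      (List.range' a m).foldl
          (fun acc j => if (acc.getD j ("", "")).1 == com_name then pvSwapA acc j else acc) acc
        = ((List.range' a m).filter (fun k => (pins.getD k ("", "")).1 == com_name)).foldl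
            (fun out j => (out.set 0 (out.getD j ("", ""))).set j (out.getD 0 ("", ""))) acc := by
  intro m
  induction m with
  | zero => intro a acc _ _; simp
  | succ m ih =>
    intro a acc ha hagree
    have hacc : acc.getD a ("", "") = pins.getD a ("", "") := hagree a le_rfl
    rw [List.range'_succ, List.filter_cons]
    by_cases hmatch : ((pins.getD a ("", "")).1 == com_name) = true
    · rw [if_pos hmatch]
      simp only [List.foldl_cons]
      rw [hacc, if_pos hmatch]
      have hAB : (acc.set 0 (pins.getD a ("", ""))).set a (acc.getD 0 ("", "")) = pvSwapA acc a := by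
        rw [← hacc]
        rfl
      rw [hAB]
      refine ih (a + 1) (pvSwapA acc a) (by omega) ?_
      intro j hj
      have h0 : (0 : Nat) ≠ j := by omega
      have ha' : a ≠ j := by omega
      simp only [pvSwapA]
      rw [getD_set_ne _ _ _ _ _ ha', getD_set_ne _ _ _ _ _ h0]
      exact hagree j (by omega)
    · rw [if_neg hmatch]
      simp only [List.foldl_cons]
      rw [hacc, if_neg hmatch]
      exact ih (a + 1) acc (by omega) (fun j hj => hagree j (by omega))

-- per-sublist: A's phase-2 transform equals B's _pull_front, on every sublist
theorem transform_eq (pins : List (String × String)) (com_name : String) :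
    (if (pins.getD 0 ("", "")).1 != com_name then pvInnerA pins com_name else pins)
      = pvPullFrontB pins com_name := by
  by_cases hhd : (pins[0]?.getD ("", "")).1 = com_name
  · rw [if_neg (by simp [hhd]), pvPullFrontB, if_pos (by simp [hhd])]
  · rw [if_pos (by simp [hhd]), pvPullFrontB, if_neg (by simp [hhd])]
    unfold pvInnerA
    cases hn : pins.length with
    | zero => simp
    | succ n =>
      rw [List.range_eq_range', List.range'_succ, Nat.zero_add, List.filter_cons]
      simp only [List.foldl_cons]
      rw [if_neg (by simp [hhd]), if_neg (by simp [hhd])]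
      exact swap_loop_eq pins com_name n 1 pins le_rfl (fun j _ => rfl)

-- ===== VERDICT (by name: the statement is the Claim_ definition above) =====
theorem focus_on_one_component_spec : Claim_equal_focus_on_one_component := by
  intro data_pin_pair com_name _
  unfold Spec_focus_on_one_component focus_on_one_component focus_on_one_component_alt
  rw [pvPhase1A_eq]
  exact List.map_congr_left (fun pins _ => transform_eq pins com_name)
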